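-- pv_equiv track=rewrite | github.com/demisto/content | Packs/Azure/Scripts/AzureIdentifyNSGExposureRule/AzureIdentifyNSGExposureRule.py | _port_matches_range
-- ===== SOURCE A (Python) =====
-- def _port_matches_range(target_port: int, port_range: str) -> bool:
--     """
--     Check if a port matches a port range specification.
--
--     Args:
--         target_port (int): The port to check
--         port_range (str): Port range specification (e.g., "80", "80-90", "80,443,8080-8090", "*")
--
--     Returns:
--         bool: True if the port matches, False otherwise
--     """
--     # Handle wildcard
--     if port_range.strip() == "*":
--         return True
--
--     # Split by commas to handle multiple ports/ranges
--     port_specs = [spec.strip() for spec in port_range.split(",")]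
--
--     for spec in port_specs:
--         if "-" in spec:
--             # Handle range (e.g., "8080-8090")
--             try:
--                 start_port_str, end_port_str = spec.split("-", 1)
--                 start_port = int(start_port_str.strip())
--                 end_port = int(end_port_str.strip())
--                 if start_port <= target_port <= end_port:
--                     return True
--             except (ValueError, IndexError):
--                 continue
--         else:
--             # Handle individual port
--             try:
--                 if int(spec) == target_port:
--                     return True
--             except ValueError:
--                 continue
--
--     return False
-- ===== SOURCE B (Python) =====
-- def _segment_matches(target_port, left, right):
--     """Decide one scanned segment: left/right are the raw chars before/after its first dash
--     (right is None when the segment has no dash)."""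
--     try:
--         if right is None:
--             return int(left) == target_port
--         return int(left) <= target_port <= int(right)
--     except ValueError:
--         return False
--
--
-- def _port_matches_range(target_port: int, port_range: str) -> bool:
--     """Single character-level scan: walk the string once, cutting segments at commas and
--     splitting each segment at its first dash on the fly; no tokenizing via split/strip."""
--     if port_range.strip() == "*":
--         return True
--     left = ""       # chars of the current segment before its first dash
--     right = None    # chars after the first dash, or None if no dash seen yet
--     matched = False
--     for ch in port_range + ",":
--         if ch == ",":
--             matched = matched or _segment_matches(target_port, left, right)
--             left, right = "", None
--         elif ch == "-" and right is None:
--             right = ""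
--         elif right is None:
--             left = left + ch
--         else:
--             right = right + ch
--     return matched
-- ===== Notes on version B (the rewrite author's own statement) =====
-- stated objective: alternative
-- what changed: A tokenizes with split(',')/strip/split('-',1) and re-parses each token; B is a single character-level scan (state machine) over port_range+',' that cuts segments at commas and splits each segment at its first dash on the fly, deciding a segment the moment its comma is reached.
import Mathlib
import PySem

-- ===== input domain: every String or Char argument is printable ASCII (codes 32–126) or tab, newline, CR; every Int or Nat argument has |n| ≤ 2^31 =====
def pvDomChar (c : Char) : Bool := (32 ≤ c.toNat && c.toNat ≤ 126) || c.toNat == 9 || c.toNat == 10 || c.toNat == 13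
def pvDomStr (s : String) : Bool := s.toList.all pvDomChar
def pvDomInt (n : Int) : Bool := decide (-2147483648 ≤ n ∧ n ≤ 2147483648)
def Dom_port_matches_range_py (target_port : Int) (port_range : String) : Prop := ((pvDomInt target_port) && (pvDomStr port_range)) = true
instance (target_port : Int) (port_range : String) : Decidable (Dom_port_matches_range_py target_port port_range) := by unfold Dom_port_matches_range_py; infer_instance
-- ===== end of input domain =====

-- B replaces A's split/strip/int tokenizing pipeline by a single character-level scan
-- (a state machine over the characters, cutting segments at commas and at each
-- segment's first dash on the fly); same return value on the stated domain.

-- ===== PORT A =====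
-- the for-loop over the stripped specs, with early return True
def pmrLoopA (target : Int) : List String → Bool
  | [] => false
  | spec :: rest =>
    if PySem.Str.isIn "-" spec then
      -- try: start,end = spec.split("-",1); int both ends; range check
      match PySem.Str.splitMax? spec "-" 1 with
      | some [s1, s2] =>
        match PySem.Int.ofStr? (PySem.Str.strip s1) with
        | some a =>
          match PySem.Int.ofStr? (PySem.Str.strip s2) with
          | some b => if a ≤ target ∧ target ≤ b then true else pmrLoopA target rest
          | none => pmrLoopA target rest
        | none => pmrLoopA target rest
      | _ => pmrLoopA target rest
    else
      match PySem.Int.ofStr? spec with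
      | some p => if p = target then true else pmrLoopA target rest
      | none => pmrLoopA target rest

def port_matches_range_py (target_port : Int) (port_range : String) : Bool :=
  if PySem.Str.strip port_range = "*" then true
  else
    pmrLoopA target_port (((PySem.Str.split? port_range ",").getD []).map PySem.Str.strip)

-- ===== PORT B =====
-- _segment_matches: decide one scanned segment from its raw left/right parts
def pmrSegB (target : Int) (left : List Char) (right : Option (List Char)) : Bool :=
  match right with
  | none =>
    match PySem.Int.ofChars? left with
    | some p => p == target
    | none => false
  | some r =>
    match PySem.Int.ofChars? left, PySem.Int.ofChars? r with
    | some a, some b => decide (a ≤ target ∧ target ≤ b)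
    | _, _ => false

-- the body of B's for-loop over the characters of port_range + ","
def pmrStepB (target : Int) (st : List Char × Option (List Char) × Bool) (ch : Char) :
    List Char × Option (List Char) × Bool :=
  if ch = ',' then ([], none, st.2.2 || pmrSegB target st.1 st.2.1)
  else if ch = '-' ∧ st.2.1 = none then (st.1, some [], st.2.2)
  else
    match st.2.1 with
    | none => (st.1 ++ [ch], none, st.2.2)
    | some r => (st.1, some (r ++ [ch]), st.2.2)

def port_matches_range_py_alt (target_port : Int) (port_range : String) : Bool :=
  if PySem.Str.strip port_range = "*" then true
  else ((port_range.toList ++ [',']).foldl (pmrStepB target_port) ([], none, false)).2.2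

-- ===== PRECONDITION & SPEC =====
def Spec_port_matches_range_py (target_port : Int) (port_range : String) (out : Bool) : Prop := out = port_matches_range_py_alt target_port port_range
instance (target_port : Int) (port_range : String) (out : Bool) : Decidable (Spec_port_matches_range_py target_port port_range out) := by unfold Spec_port_matches_range_py; infer_instance

-- ===== CLAIM (what is proved, stated in full; the proofs are below) =====
def Claim_equal_port_matches_range_py : Prop := ∀ (target_port : Int) (port_range : String), Dom_port_matches_range_py target_port port_range → Spec_port_matches_range_py target_port port_range (port_matches_range_py target_port port_range)

-- ===== LEMMAS AND PROOFS =====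

-- proof-only helpers: a first-dash splitter, a char-level restatement of A's loop,
-- and a structural comma-splitter
def pmrDashSplit : List Char → List Char × Option (List Char)
  | [] => ([], none)
  | c :: cs =>
    if c = '-' then ([], some cs)
    else
      match pmrDashSplit cs with
      | (a, r) => (c :: a, r)

def pmrCLoopA (target : Int) : List (List Char) → Bool
  | [] => false
  | spec :: rest =>
    if PySem.Chars.isIn ['-'] spec then
      match PySem.Chars.splitOnMax spec ['-'] 1 with
      | [s1, s2] =>
        match PySem.Int.ofChars? (PySem.Chars.strip s1) with
        | some a =>
          match PySem.Int.ofChars? (PySem.Chars.strip s2) with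
          | some b => if a ≤ target ∧ target ≤ b then true else pmrCLoopA target rest
          | none => pmrCLoopA target rest
        | none => pmrCLoopA target rest
      | _ => pmrCLoopA target rest
    else
      match PySem.Int.ofChars? spec with
      | some p => if p = target then true else pmrCLoopA target rest
      | none => pmrCLoopA target rest

def pmrCommaSplit : List Char → List (List Char)
  | [] => [[]]
  | c :: cs =>
    if c = ',' then [] :: pmrCommaSplit cs
    else
      match pmrCommaSplit cs with
      | [] => [[c]]
      | h :: t => (c :: h) :: t

theorem pmrCommaSplit_ne_nil (cs : List Char) : pmrCommaSplit cs ≠ [] := by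
  induction cs with
  | nil => simp [pmrCommaSplit]
  | cons c cs ih =>
    simp only [pmrCommaSplit]
    split
    · simp
    · cases h : pmrCommaSplit cs <;> simp

theorem go_inv : ∀ (fuel : Nat) (l cur : List Char) (acc : List (List Char)), l.length ≤ fuel →
    PySem.Chars.splitOn.go [','] fuel l cur acc =
      acc.reverse ++ (match pmrCommaSplit l with
        | [] => []
        | h :: t => (cur.reverse ++ h) :: t)
  | fuel, [], cur, acc, _ => by
      rw [PySem.Chars.splitOn.go.eq_def]
      cases fuel <;> simp [pmrCommaSplit]
  | fuel+1, c :: rest, cur, acc, h => by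
      rw [PySem.Chars.splitOn.go.eq_def]
      by_cases hc : c = ','
      · subst hc
        have hpre : List.isPrefixOf [','] (',' :: rest) = true := by
          simp [List.isPrefixOf]
        simp only [hpre, if_true, List.length_cons, List.length_nil, List.drop_succ_cons, List.drop_zero]
        rw [go_inv fuel rest [] (cur.reverse :: acc) (by simpa using h)]
        cases hr : pmrCommaSplit rest with
        | nil => exact absurd hr (pmrCommaSplit_ne_nil rest)
        | cons h0 t0 => simp [pmrCommaSplit, hr]
      · have hpre : List.isPrefixOf [','] (c :: rest) = false := by
          simp [List.isPrefixOf]; exact fun hh => absurd hh.symm hc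
        simp only [hpre, Bool.false_eq_true, if_false]
        rw [go_inv fuel rest (c :: cur) acc (by simpa using h)]
        cases hr : pmrCommaSplit rest with
        | nil => exact absurd hr (pmrCommaSplit_ne_nil rest)
        | cons h0 t0 => simp [pmrCommaSplit, hr, hc]

theorem splitOn_eq_commaSplit (cs : List Char) :
    PySem.Chars.splitOn cs [','] = pmrCommaSplit cs := by
  unfold PySem.Chars.splitOn
  rw [go_inv (cs.length + 1) cs [] [] (by omega)]
  cases h : pmrCommaSplit cs with
  | nil => exact absurd h (pmrCommaSplit_ne_nil cs)
  | cons h0 t0 => simp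

theorem goMax_zero (fuel : Nat) (l cur : List Char) (acc : List (List Char)) :
    PySem.Chars.splitOnMax.go ['-'] fuel 0 l cur acc = ((cur.reverse ++ l) :: acc).reverse := by
  rw [PySem.Chars.splitOnMax.go.eq_def]
  cases fuel with
  | zero => rfl
  | succ f => cases l <;> simp

theorem goMax_inv : ∀ (fuel : Nat) (l cur : List Char) (acc : List (List Char)), l.length ≤ fuel →
    PySem.Chars.splitOnMax.go ['-'] fuel 1 l cur acc =
      acc.reverse ++ (match pmrDashSplit l with
        | (a, some b) => [cur.reverse ++ a, b]
        | (a, none) => [cur.reverse ++ a])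
  | fuel, [], cur, acc, _ => by
      rw [PySem.Chars.splitOnMax.go.eq_def]
      cases fuel <;> simp [pmrDashSplit]
  | fuel+1, c :: rest, cur, acc, h => by
      rw [PySem.Chars.splitOnMax.go.eq_def]
      by_cases hc : c = '-'
      · subst hc
        have hpre : List.isPrefixOf ['-'] ('-' :: rest) = true := by simp [List.isPrefixOf]
        simp only [hpre, if_true, List.length_cons, List.length_nil, List.drop_succ_cons,
          List.drop_zero, Nat.sub_self, if_neg (by omega : ¬ (1:Nat) = 0)]
        rw [goMax_zero]
        simp [pmrDashSplit]
      · have hpre : List.isPrefixOf ['-'] (c :: rest) = false := by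
          simp [List.isPrefixOf]; exact fun hh => absurd hh.symm hc
        simp only [hpre, Bool.false_eq_true, if_false, if_neg (by omega : ¬ (1:Nat) = 0)]
        rw [goMax_inv fuel rest (c :: cur) acc (by simpa using h)]
        cases hr : pmrDashSplit rest with
        | mk a r => cases r <;> simp [pmrDashSplit, hr, hc]

theorem splitOnMax_dash (cs : List Char) :
    PySem.Chars.splitOnMax cs ['-'] 1 =
      (match pmrDashSplit cs with
       | (a, some b) => [a, b]
       | (a, none) => [a]) := by
  unfold PySem.Chars.splitOnMax
  rw [if_neg (by omega : ¬ (1:Int) < 0)]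
  have ht : Int.toNat 1 = 1 := rfl
  rw [ht, goMax_inv (cs.length + 1) cs [] [] (by omega)]
  cases h : pmrDashSplit cs with
  | mk a r => cases r <;> simp

theorem dropWhile_congr' {α : Type} (p q : α → Bool) (l : List α)
    (h : ∀ a ∈ l, p a = q a) : List.dropWhile p l = List.dropWhile q l := by
  induction l with
  | nil => rfl
  | cons a l ih =>
    simp only [List.dropWhile_cons]
    rw [h a (by simp)]
    split
    · exact ih (fun a ha => h a (by simp [ha]))
    · rfl

theorem rdropWhile_congr' {α : Type} (p q : α → Bool) (l : List α)
    (h : ∀ a ∈ l, p a = q a) : List.rdropWhile p l = List.rdropWhile q l := by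
  unfold List.rdropWhile
  rw [dropWhile_congr' p q l.reverse (fun a ha => h a (by simpa using ha))]

theorem dropWhile_rdropWhile_comm {α : Type} (p : α → Bool) (l : List α) :
    List.dropWhile p (List.rdropWhile p l) = List.rdropWhile p (List.dropWhile p l) := by
  induction l using List.reverseRecOn with
  | nil => simp
  | append_singleton l x ih =>
    by_cases hx : p x
    · rw [List.rdropWhile_concat_pos p l x hx, ih, List.dropWhile_append]
      cases hu : List.dropWhile p l with
      | nil => simp [List.dropWhile_cons, hx, hu]
      | cons a u =>
        simp only [hu, List.isEmpty_cons, Bool.false_eq_true, if_false]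
        rw [List.rdropWhile_concat_pos p (a :: u) x hx]
    · rw [List.rdropWhile_concat_neg p l x hx, List.dropWhile_append]
      cases hu : List.dropWhile p l with
      | nil => simp [List.dropWhile_cons, hx, List.rdropWhile_singleton, hu]
      | cons a u =>
        simp only [hu, List.isEmpty_cons, Bool.false_eq_true, if_false]
        rw [List.rdropWhile_concat_neg p (a :: u) x hx]

-- "pstrip": strip both ends
theorem pstrip_pstrip {α : Type} (p : α → Bool) (l : List α) :
    List.rdropWhile p (List.dropWhile p (List.rdropWhile p (List.dropWhile p l))) =
      List.rdropWhile p (List.dropWhile p l) := by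
  rw [dropWhile_rdropWhile_comm, List.dropWhile_idempotent, List.rdropWhile_idempotent]

theorem pstrip_dropWhile {α : Type} (p : α → Bool) (l : List α) :
    List.rdropWhile p (List.dropWhile p (List.dropWhile p l)) =
      List.rdropWhile p (List.dropWhile p l) := by
  rw [List.dropWhile_idempotent]

theorem pstrip_rdropWhile {α : Type} (p : α → Bool) (l : List α) :
    List.rdropWhile p (List.dropWhile p (List.rdropWhile p l)) =
      List.rdropWhile p (List.dropWhile p l) := by
  rw [dropWhile_rdropWhile_comm, List.rdropWhile_idempotent]

theorem lstrip_eq (s : List Char) : PySem.Chars.lstrip s = List.dropWhile PySem.Chars.isspace s := rfl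
theorem rstrip_eq (s : List Char) : PySem.Chars.rstrip s = List.rdropWhile PySem.Chars.isspace s := rfl
theorem strip_eq (s : List Char) :
    PySem.Chars.strip s = List.rdropWhile PySem.Chars.isspace (List.dropWhile PySem.Chars.isspace s) := rfl

-- ofChars? depends only on the isIntSpace-stripped core
theorem ofChars?_congr (x y : List Char)
    (h : List.rdropWhile PySem.Int.isIntSpace (List.dropWhile PySem.Int.isIntSpace x) =
         List.rdropWhile PySem.Int.isIntSpace (List.dropWhile PySem.Int.isIntSpace y)) :
    PySem.Int.ofChars? x = PySem.Int.ofChars? y := by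
  unfold PySem.Int.ofChars?
  unfold List.rdropWhile at h
  rw [h]


theorem char_toNat_iff (c d : Char) : c.toNat = d.toNat ↔ c = d :=
  eq_iff_eq_of_cmp_eq_cmp rfl

theorem wsEq_of_dom (c : Char) (h : pvDomChar c = true) :
    PySem.Chars.isspace c = PySem.Int.isIntSpace c := by
  simp only [pvDomChar, Bool.or_eq_true, Bool.and_eq_true, decide_eq_true_eq, beq_iff_eq] at h
  simp only [PySem.Chars.isspace, PySem.Int.isIntSpace, ← char_toNat_iff]
  have h1 : (' ').toNat = 32 := rfl
  have h2 : ('\t').toNat = 9 := rfl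
  have h3 : ('\n').toNat = 10 := rfl
  have h4 : ('\x0d').toNat = 13 := rfl
  have h5 : ('\x0b').toNat = 11 := rfl
  have h6 : ('\x0c').toNat = 12 := rfl
  rw [Bool.eq_iff_iff]
  simp only [Bool.or_eq_true, Bool.and_eq_true, decide_eq_true_eq, h1, h2, h3, h4, h5, h6]
  omega

def pmrWsEq (cs : List Char) : Prop := ∀ c ∈ cs, PySem.Chars.isspace c = PySem.Int.isIntSpace c

theorem wsEq_sub {cs ds : List Char} (h : pmrWsEq cs) (hsub : ∀ c ∈ ds, c ∈ cs) : pmrWsEq ds :=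
  fun c hc => h c (hsub c hc)

theorem mem_dropWhile_sub {α : Type} (p : α → Bool) (l : List α) :
    ∀ a ∈ List.dropWhile p l, a ∈ l := fun _ ha => (List.dropWhile_sublist p).mem ha

theorem mem_rdropWhile_sub {α : Type} (p : α → Bool) (l : List α) :
    ∀ a ∈ List.rdropWhile p l, a ∈ l := fun _ ha => (List.rdropWhile_prefix p l).sublist.mem ha

-- strip under wsEq is the isIntSpace strip
theorem strip_eq_intStrip (cs : List Char) (h : pmrWsEq cs) :
    PySem.Chars.strip cs =
      List.rdropWhile PySem.Int.isIntSpace (List.dropWhile PySem.Int.isIntSpace cs) := by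
  rw [strip_eq, dropWhile_congr' _ _ cs h,
    rdropWhile_congr' _ _ _ (wsEq_sub h (mem_dropWhile_sub _ cs))]

theorem ofChars?_strip (cs : List Char) (h : pmrWsEq cs) :
    PySem.Int.ofChars? (PySem.Chars.strip cs) = PySem.Int.ofChars? cs := by
  apply ofChars?_congr
  rw [strip_eq_intStrip cs h]
  exact pstrip_pstrip _ _

theorem wsEq_lstrip {a : List Char} (h : pmrWsEq a) : pmrWsEq (PySem.Chars.lstrip a) := by
  rw [lstrip_eq]; exact wsEq_sub h (mem_dropWhile_sub _ a)

theorem wsEq_rstrip {a : List Char} (h : pmrWsEq a) : pmrWsEq (PySem.Chars.rstrip a) := by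
  rw [rstrip_eq]; exact wsEq_sub h (mem_rdropWhile_sub _ a)

theorem ofChars?_strip_lstrip (a : List Char) (h : pmrWsEq a) :
    PySem.Int.ofChars? (PySem.Chars.strip (PySem.Chars.lstrip a)) = PySem.Int.ofChars? a := by
  apply ofChars?_congr
  rw [strip_eq_intStrip _ (wsEq_lstrip h), lstrip_eq, dropWhile_congr' _ _ a h]
  rw [pstrip_dropWhile]
  exact pstrip_pstrip _ _

theorem ofChars?_strip_rstrip (a : List Char) (h : pmrWsEq a) :
    PySem.Int.ofChars? (PySem.Chars.strip (PySem.Chars.rstrip a)) = PySem.Int.ofChars? a := by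
  apply ofChars?_congr
  rw [strip_eq_intStrip _ (wsEq_rstrip h), rstrip_eq,
    rdropWhile_congr' _ _ a h, pstrip_rdropWhile, List.dropWhile_idempotent,
    pstrip_rdropWhile]

theorem mem_dropWhile_of_not {α : Type} (p : α → Bool) (l : List α) (a : α)
    (ha : a ∈ l) (hp : p a = false) : a ∈ List.dropWhile p l := by
  induction l with
  | nil => cases ha
  | cons b l ih =>
    rw [List.dropWhile_cons]
    split
    · rcases List.mem_cons.mp ha with rfl | hm
      · simp_all
      · exact ih hm
    · exact ha

theorem mem_rdropWhile_of_not {α : Type} (p : α → Bool) (l : List α) (a : α)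
    (ha : a ∈ l) (hp : p a = false) : a ∈ List.rdropWhile p l := by
  unfold List.rdropWhile
  rw [List.mem_reverse]
  exact mem_dropWhile_of_not p l.reverse a (by simpa using ha) hp

theorem dash_not_ws : PySem.Chars.isspace '-' = false := by decide

theorem dash_mem_strip (cs : List Char) : '-' ∈ PySem.Chars.strip cs ↔ '-' ∈ cs := by
  rw [strip_eq]
  constructor
  · exact fun h => mem_dropWhile_sub _ _ _ (mem_rdropWhile_sub _ _ _ h)
  · intro h
    exact mem_rdropWhile_of_not _ _ _ (mem_dropWhile_of_not _ _ _ h dash_not_ws) dash_not_ws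

theorem isIn_dash (cs : List Char) : PySem.Chars.isIn ['-'] cs = decide ('-' ∈ cs) := by
  rw [Bool.eq_iff_iff, PySem.Chars.isIn_iff_infix, List.singleton_infix_iff, decide_eq_true_eq]

theorem dashSplit_none (p : List Char) :
    ∀ a, pmrDashSplit p = (a, none) → a = p ∧ '-' ∉ p := by
  induction p with
  | nil => intro a h; simp [pmrDashSplit] at h; simp [h]
  | cons c cs ih =>
    intro a h
    by_cases hc : c = '-'
    · simp [pmrDashSplit, if_pos hc] at h
    · simp only [pmrDashSplit, if_neg hc] at h
      rcases hr : pmrDashSplit cs with ⟨a', r⟩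
      rw [hr] at h
      cases r with
      | some b => simp at h
      | none =>
        simp only [Prod.mk.injEq, and_true] at h
        obtain ⟨rfl, hm⟩ := ih a' hr
        subst h
        refine ⟨rfl, ?_⟩
        intro hx
        rcases List.mem_cons.mp hx with h1 | h1
        · exact hc h1.symm
        · exact hm h1

theorem dashSplit_some (p : List Char) :
    ∀ a b, pmrDashSplit p = (a, some b) → p = a ++ '-' :: b ∧ '-' ∉ a := by
  induction p with
  | nil => intro a b h; simp [pmrDashSplit] at h
  | cons c cs ih =>
    intro a b h
    by_cases hc : c = '-'
    · subst hc
      simp only [pmrDashSplit, if_pos rfl, Prod.mk.injEq, Option.some.injEq] at h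
      rcases h with ⟨rfl, rfl⟩
      simp
    · simp only [pmrDashSplit, if_neg hc] at h
      rcases hr : pmrDashSplit cs with ⟨a', r⟩
      rw [hr] at h
      cases r with
      | none => simp at h
      | some b' =>
        simp only [Prod.mk.injEq, Option.some.injEq] at h
        rcases h with ⟨rfl, rfl⟩
        obtain ⟨hp, hm⟩ := ih _ _ hr
        refine ⟨by simp [hp], ?_⟩
        intro hx
        rcases List.mem_cons.mp hx with h1 | h1
        · exact hc h1.symm
        · exact hm h1

theorem dashSplit_append_dash (x y : List Char) (hx : '-' ∉ x) :
    pmrDashSplit (x ++ '-' :: y) = (x, some y) := by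
  induction x with
  | nil => simp [pmrDashSplit]
  | cons c cs ih =>
    have hc : c ≠ '-' := by intro h; exact hx (by simp [h])
    simp only [List.cons_append, pmrDashSplit, if_neg hc,
      ih (fun hm => hx (by simp [hm]))]

theorem dropWhile_append_mid {α : Type} (p : α → Bool) (l1 l2 : List α) (x : α) (hx : p x = false) :
    List.dropWhile p (l1 ++ x :: l2) = List.dropWhile p l1 ++ x :: l2 := by
  rw [List.dropWhile_append]
  cases h : List.dropWhile p l1 with
  | nil => simp [List.dropWhile_cons, hx]
  | cons a u => simp

theorem rdropWhile_append_mid {α : Type} (p : α → Bool) (l1 l2 : List α) (x : α) (hx : p x = false) :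
    List.rdropWhile p (l1 ++ x :: l2) = l1 ++ x :: List.rdropWhile p l2 := by
  unfold List.rdropWhile
  rw [show l1 ++ x :: l2 = l1 ++ [x] ++ l2 by simp, List.reverse_append, List.reverse_append]
  simp only [List.reverse_singleton, List.append_assoc, List.singleton_append]
  rw [dropWhile_append_mid p l2.reverse l1.reverse x hx]
  simp

theorem strip_dash_decomp (a b : List Char) :
    PySem.Chars.strip (a ++ '-' :: b) =
      PySem.Chars.lstrip a ++ '-' :: PySem.Chars.rstrip b := by
  rw [strip_eq, lstrip_eq, rstrip_eq, dropWhile_append_mid _ _ _ _ dash_not_ws,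
    rdropWhile_append_mid _ _ _ _ dash_not_ws]

theorem segB_eq_cloopA_one (t : Int) (p : List Char) (h : pmrWsEq p) :
    pmrSegB t (pmrDashSplit p).1 (pmrDashSplit p).2 = pmrCLoopA t [PySem.Chars.strip p] := by
  rcases hd : pmrDashSplit p with ⟨a, r⟩
  cases r with
  | none =>
    obtain ⟨rfl, hm⟩ := dashSplit_none p a hd
    simp only [pmrSegB, pmrCLoopA]
    rw [isIn_dash, decide_eq_false (fun hx => hm ((dash_mem_strip a).mp hx))]
    simp only [Bool.false_eq_true, if_false]
    rw [ofChars?_strip a h]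
    cases ho : PySem.Int.ofChars? a with
    | none => rfl
    | some v =>
      by_cases hv : v = t
      · simp [hv]
      · simp [hv, pmrCLoopA]
  | some b =>
    obtain ⟨hp, hm⟩ := dashSplit_some p a b hd
    subst hp
    simp only [pmrSegB, pmrCLoopA]
    rw [strip_dash_decomp a b, isIn_dash,
      decide_eq_true (by simp : '-' ∈ PySem.Chars.lstrip a ++ '-' :: PySem.Chars.rstrip b)]
    simp only [if_true]
    have hlm : '-' ∉ PySem.Chars.lstrip a := by
      rw [lstrip_eq]
      exact fun hx => hm (mem_dropWhile_sub _ a '-' hx)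
    have hsm : PySem.Chars.splitOnMax
        (PySem.Chars.lstrip a ++ '-' :: PySem.Chars.rstrip b) ['-'] 1
        = [PySem.Chars.lstrip a, PySem.Chars.rstrip b] := by
      rw [splitOnMax_dash, dashSplit_append_dash (PySem.Chars.lstrip a) (PySem.Chars.rstrip b) hlm]
    simp only [hsm]
    have ha : pmrWsEq a := fun c hc => h c (by simp [hc])
    have hb : pmrWsEq b := fun c hc => h c (by simp [hc])
    rw [ofChars?_strip_lstrip a ha, ofChars?_strip_rstrip b hb]
    cases PySem.Int.ofChars? a with
    | none => rfl
    | some x =>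
      cases PySem.Int.ofChars? b with
      | none => rfl
      | some y =>
        by_cases hxy : x ≤ t ∧ t ≤ y
        · simp [hxy]
        · simp [hxy, pmrCLoopA]

theorem cloopA_cons (t : Int) (spec : List Char) (rest : List (List Char)) :
    pmrCLoopA t (spec :: rest) = (pmrCLoopA t [spec] || pmrCLoopA t rest) := by
  simp only [pmrCLoopA]
  split
  · rcases hsm : PySem.Chars.splitOnMax spec ['-'] 1 with _ | ⟨s1, _ | ⟨s2, _ | _⟩⟩
    · simp [hsm]
    · simp [hsm]
    · simp only [hsm]
      cases PySem.Int.ofChars? (PySem.Chars.strip s1) with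
      | none => simp
      | some a =>
        cases PySem.Int.ofChars? (PySem.Chars.strip s2) with
        | none => simp
        | some b => by_cases hxy : a ≤ t ∧ t ≤ b <;> simp [hxy]
    · simp [hsm]
  · cases PySem.Int.ofChars? spec with
    | none => simp
    | some v => by_cases hv : v = t <;> simp [hv]

theorem commaSplit_no_comma (p : List Char) (hp : ',' ∉ p) : pmrCommaSplit p = [p] := by
  induction p with
  | nil => rfl
  | cons c cs ih =>
    have hc : c ≠ ',' := fun h => hp (by simp [h])
    simp only [pmrCommaSplit, if_neg hc, ih (fun h => hp (by simp [h]))]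

theorem commaSplit_append (p : List Char) (hp : ',' ∉ p) (rest : List Char) :
    pmrCommaSplit (p ++ ',' :: rest) = p :: pmrCommaSplit rest := by
  induction p with
  | nil => simp [pmrCommaSplit]
  | cons c cs ih =>
    have hc : c ≠ ',' := fun h => hp (by simp [h])
    simp only [List.cons_append, pmrCommaSplit, if_neg hc,
      ih (fun h => hp (by simp [h]))]

theorem dashSplit_snoc (p : List Char) (c : Char) :
    pmrDashSplit (p ++ [c]) =
      (match pmrDashSplit p with
       | (a, none) => if c = '-' then (a, some []) else (a ++ [c], none)
       | (a, some b) => (a, some (b ++ [c]))) := by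
  induction p with
  | nil => by_cases hc : c = '-' <;> simp [pmrDashSplit, hc]
  | cons d ds ih =>
    by_cases hd : d = '-'
    · simp [pmrDashSplit, hd]
    · simp only [List.cons_append, pmrDashSplit, if_neg hd, ih]
      rcases pmrDashSplit ds with ⟨a, _ | b⟩
      · by_cases hc : c = '-' <;> simp [hc]
      · simp

theorem scan_inv (t : Int) : ∀ (cs p : List Char) (m : Bool), ',' ∉ p → pmrWsEq (p ++ cs) →
    ((cs ++ [',']).foldl (pmrStepB t) ((pmrDashSplit p).1, (pmrDashSplit p).2, m)).2.2
      = (m || pmrCLoopA t ((pmrCommaSplit (p ++ cs)).map PySem.Chars.strip))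
  | [], p, m, hp, hw => by
      have hstep : pmrStepB t ((pmrDashSplit p).1, (pmrDashSplit p).2, m) ','
          = ([], none, m || pmrSegB t (pmrDashSplit p).1 (pmrDashSplit p).2) := by
        simp [pmrStepB]
      simp only [List.nil_append, List.singleton_append, List.foldl_cons, List.foldl_nil, hstep]
      rw [List.append_nil, commaSplit_no_comma p hp]
      simp only [List.map_cons, List.map_nil]
      show (m || pmrSegB t (pmrDashSplit p).1 (pmrDashSplit p).2) = _
      rw [segB_eq_cloopA_one t p (by simpa using hw)]
  | c :: cs, p, m, hp, hw => by
      by_cases hc : c = ','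
      · subst hc
        have hstep : pmrStepB t ((pmrDashSplit p).1, (pmrDashSplit p).2, m) ','
            = ((pmrDashSplit []).1, (pmrDashSplit []).2,
               m || pmrSegB t (pmrDashSplit p).1 (pmrDashSplit p).2) := by
          simp [pmrStepB, pmrDashSplit]
        simp only [List.cons_append, List.foldl_cons, hstep]
        have hp0 : ',' ∉ ([] : List Char) := by simp
        have hw0 : pmrWsEq (([] : List Char) ++ cs) := by
          intro x hx
          have hx' : x ∈ cs := by simpa using hx
          exact hw x (by simp [hx'])
        rw [scan_inv t cs [] _ hp0 hw0]
        rw [commaSplit_append p hp cs]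
        simp only [List.map_cons, List.nil_append]
        rw [cloopA_cons, segB_eq_cloopA_one t p
          (fun x hx => hw x (by simp [hx])), Bool.or_assoc]
      · simp only [List.cons_append, List.foldl_cons]
        have hstep : pmrStepB t ((pmrDashSplit p).1, (pmrDashSplit p).2, m) c
            = ((pmrDashSplit (p ++ [c])).1, (pmrDashSplit (p ++ [c])).2, m) := by
          rw [dashSplit_snoc]
          rcases pmrDashSplit p with ⟨a, _ | r⟩
          · by_cases hdash : c = '-'
            · simp [pmrStepB, hc, hdash]
            · simp [pmrStepB, hc, hdash]
          · simp [pmrStepB, hc]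
        have hpc : ',' ∉ p ++ [c] := by
          intro hx
          rcases List.mem_append.mp hx with h1 | h1
          · exact hp h1
          · exact hc (List.mem_singleton.mp h1).symm
        have hwc : pmrWsEq ((p ++ [c]) ++ cs) := by simpa using hw
        rw [hstep, scan_inv t cs (p ++ [c]) m hpc hwc]
        rw [show p ++ [c] ++ cs = p ++ c :: cs by simp]

theorem loopA_ofList (t : Int) (css : List (List Char)) :
    pmrLoopA t (css.map String.ofList) = pmrCLoopA t css := by
  induction css with
  | nil => rfl
  | cons cs css ih =>
    simp only [List.map_cons, pmrLoopA, pmrCLoopA]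
    have hin : PySem.Str.isIn "-" (String.ofList cs) = PySem.Chars.isIn ['-'] cs := by
      simp [PySem.Str.isIn, String.toList_ofList]
    rw [hin]
    split
    · have hsm : PySem.Str.splitMax? (String.ofList cs) "-" 1
          = some ((PySem.Chars.splitOnMax cs ['-'] 1).map String.ofList) := by
        simp [PySem.Str.splitMax?, PySem.Chars.splitMax?, String.toList_ofList]
      rw [hsm]
      rcases PySem.Chars.splitOnMax cs ['-'] 1 with _ | ⟨s1, _ | ⟨s2, _ | _⟩⟩
      · simpa using ih
      · simpa using ih
      · simp only [List.map_cons, List.map_nil]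
        have h1 : PySem.Int.ofStr? (PySem.Str.strip (String.ofList s1))
            = PySem.Int.ofChars? (PySem.Chars.strip s1) := by
          simp [PySem.Int.ofStr?, PySem.Str.strip, String.toList_ofList]
        have h2 : PySem.Int.ofStr? (PySem.Str.strip (String.ofList s2))
            = PySem.Int.ofChars? (PySem.Chars.strip s2) := by
          simp [PySem.Int.ofStr?, PySem.Str.strip, String.toList_ofList]
        rw [h1, h2]
        cases PySem.Int.ofChars? (PySem.Chars.strip s1) with
        | none => exact ih
        | some a =>
          cases PySem.Int.ofChars? (PySem.Chars.strip s2) with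
          | none => exact ih
          | some b => by_cases hxy : a ≤ t ∧ t ≤ b <;> simp [hxy, ih]
      · simpa using ih
    · have h0 : PySem.Int.ofStr? (String.ofList cs) = PySem.Int.ofChars? cs := by
        simp [PySem.Int.ofStr?, String.toList_ofList]
      rw [h0]
      cases PySem.Int.ofChars? cs with
      | none => exact ih
      | some v => by_cases hv : v = t <;> simp [hv, ih]


theorem pmr_main (t : Int) (s : String) (hdom : s.toList.all pvDomChar = true) :
    port_matches_range_py t s = port_matches_range_py_alt t s := by
  unfold port_matches_range_py port_matches_range_py_alt
  split
  · rfl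
  · have hw : pmrWsEq (([] : List Char) ++ s.toList) := by
      intro c hc
      exact wsEq_of_dom c (by
        rw [List.all_eq_true] at hdom
        exact hdom c (by simpa using hc))
    have hsplit : PySem.Str.split? s ","
        = some ((pmrCommaSplit s.toList).map String.ofList) := by
      simp [PySem.Str.split?, PySem.Chars.split?, splitOn_eq_commaSplit]
    rw [hsplit]
    have hmap : ((pmrCommaSplit s.toList).map String.ofList).map PySem.Str.strip
        = ((pmrCommaSplit s.toList).map PySem.Chars.strip).map String.ofList := by
      simp only [List.map_map]
      apply List.map_congr_left
      intro cs _
      simp [PySem.Str.strip, String.toList_ofList]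
    simp only [Option.getD_some]
    rw [hmap, loopA_ofList]
    have hscan := scan_inv t s.toList [] false (by simp) hw
    simp only [pmrDashSplit, List.nil_append, Bool.false_or] at hscan
    exact hscan.symm

-- ===== VERDICT (by name: the statement is the Claim_ definition above) =====
theorem port_matches_range_py_spec : Claim_equal_port_matches_range_py := by
  intro target_port port_range hdom
  unfold Spec_port_matches_range_py
  unfold Dom_port_matches_range_py at hdom
  rw [Bool.and_eq_true] at hdom
  exact pmr_main target_port port_range hdom.2
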